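-- pv_equiv track=rewrite | github.com/DRL/blobtools | bloblib/BtTax.py | getLineages
-- ===== SOURCE A (Python) =====
-- RANKS = ['species', 'genus', 'family', 'order', 'phylum', 'superkingdom']
--
-- def getLineages(tree_lists, nodesDB):
--     lineage = {}
--     for tree_list_id, tree_list in tree_lists.items():
--         lineage[tree_list_id] = {rank : 'undef' for rank in RANKS}
--         for taxId in tree_list:
--             node = nodesDB[taxId]
--             if node['rank'] in RANKS:
--                 lineage[tree_list_id][node['rank']] = node['name']
--         # traverse ranks again so that undef is "higher_def_rank" + "-" + undef
--         def_rank = ''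
--         for rank in reversed(list(RANKS)):
--             if not lineage[tree_list_id][rank] == 'undef':
--                 def_rank = lineage[tree_list_id][rank]
--             else:
--                 if (def_rank):
--                     lineage[tree_list_id][rank] = def_rank + "-" + lineage[tree_list_id][rank]
--     return lineage
-- ===== SOURCE B (Python) =====
-- RANKS = ['species', 'genus', 'family', 'order', 'phylum', 'superkingdom']
--
-- def getLineages(tree_lists, nodesDB):
--     # no carry variable: for each undef rank, look up the nearest defined higher rank independently
--     lineage = {}
--     for tree_list_id, tree_list in tree_lists.items():
--         ranks = {rank: 'undef' for rank in RANKS}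
--         for taxId in tree_list:
--             node = nodesDB[taxId]
--             if node['rank'] in RANKS:
--                 ranks[node['rank']] = node['name']
--         resolved = {}
--         for i, rank in enumerate(RANKS):
--             if ranks[rank] != 'undef':
--                 resolved[rank] = ranks[rank]
--             else:
--                 anc = next((ranks[r] for r in RANKS[i + 1:] if ranks[r] != 'undef'), '')
--                 resolved[rank] = anc + '-undef' if anc else ranks[rank]
--         lineage[tree_list_id] = resolved
--     return lineage
-- ===== Notes on version B (the rewrite author's own statement) =====
-- stated objective: alternative
-- what changed: The reversed-RANKS carry-variable loop is replaced by a forward pass that, for each still-undefined rank, independently scans the higher ranks for the nearest defined name and builds a fresh per-tree dict; no accumulator is threaded between iterations.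
import Mathlib
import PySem

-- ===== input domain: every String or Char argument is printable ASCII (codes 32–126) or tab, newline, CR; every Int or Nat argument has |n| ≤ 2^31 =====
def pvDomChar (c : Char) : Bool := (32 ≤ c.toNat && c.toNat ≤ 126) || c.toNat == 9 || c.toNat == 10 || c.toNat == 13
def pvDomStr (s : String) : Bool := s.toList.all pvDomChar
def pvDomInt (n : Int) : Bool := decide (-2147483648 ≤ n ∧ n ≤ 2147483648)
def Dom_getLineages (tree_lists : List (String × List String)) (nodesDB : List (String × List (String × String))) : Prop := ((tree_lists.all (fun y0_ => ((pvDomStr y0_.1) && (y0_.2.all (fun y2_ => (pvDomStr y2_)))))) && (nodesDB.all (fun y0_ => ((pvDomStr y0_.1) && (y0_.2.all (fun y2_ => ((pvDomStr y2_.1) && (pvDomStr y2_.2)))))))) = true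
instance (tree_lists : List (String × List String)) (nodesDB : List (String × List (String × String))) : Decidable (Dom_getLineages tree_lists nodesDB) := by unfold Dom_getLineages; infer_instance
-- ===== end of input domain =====

-- B replaces A's reversed-RANKS carry-variable loop by a forward pass that resolves each undefined
-- rank independently from the nearest defined higher rank (alternative decomposition, same values).

-- ===== PORT A =====
def pvRanks : List String := ["species", "genus", "family", "order", "phylum", "superkingdom"]

-- {rank: 'undef' for rank in RANKS}
def pvInit : PySem.Dict String String :=
  pvRanks.foldl (fun d rank => d.insert rank "undef") PySem.Dict.empty

-- body of the fill loop over the tree_list (this phase is shared verbatim by A and B)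
def pvFillStep (nodesDB : PySem.Dict String (List (String × String)))
    (d : PySem.Dict String String) (taxId : String) : PySem.Dict String String :=
  let node := PySem.Dict.ofList (nodesDB.getD taxId [])      -- nodesDB[taxId]; KeyError excluded by Pre_
  if pvRanks.contains (node.getD "rank" "") then             -- node['rank'] in RANKS; KeyError excluded by Pre_
    d.insert (node.getD "rank" "") (node.getD "name" "")     -- node['name']; KeyError excluded by Pre_
  else d

def pvFill (nodesDB : PySem.Dict String (List (String × String))) (tree_list : List String) : PySem.Dict String String :=
  tree_list.foldl (pvFillStep nodesDB) pvInit

-- one step of A's 'for rank in reversed(list(RANKS))' loop; state = (def_rank, lineage[tree_list_id])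
def pvCarryStep (st : String × PySem.Dict String String) (rank : String) : String × PySem.Dict String String :=
  if (st.2.getD rank "" == "undef") = false then (st.2.getD rank "", st.2)
  else if (st.1 == "") = false then (st.1, st.2.insert rank (st.1 ++ "-" ++ st.2.getD rank ""))
  else st

def getLineages (tree_lists : List (String × List String)) (nodesDB : List (String × List (String × String))) : List (String × List (String × String)) :=
  ((PySem.Dict.ofList tree_lists).items.foldl
    (fun lineage p =>
      lineage.insert p.1 ((pvRanks.reverse.foldl pvCarryStep ("", pvFill (PySem.Dict.ofList nodesDB) p.2)).2.items))
    PySem.Dict.empty).items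

-- ===== PORT B =====
-- next((ranks[r] for r in RANKS[i+1:] if ranks[r] != 'undef'), '')
def pvNearestDef (d : PySem.Dict String String) (higher : List String) : String :=
  ((higher.map (fun r => d.getD r "")).find? (fun v => v != "undef")).getD ""

-- forward pass over RANKS: each rank is resolved independently from the original per-tree dict
def pvResolve (d : PySem.Dict String String) : List String → List (String × String)
  | [] => []
  | rank :: higher =>
    (rank,
      if (d.getD rank "" != "undef") = true then d.getD rank ""
      else if (pvNearestDef d higher != "") = true then pvNearestDef d higher ++ "-undef"
      else d.getD rank "") :: pvResolve d higher

def getLineages_alt (tree_lists : List (String × List String)) (nodesDB : List (String × List (String × String))) : List (String × List (String × String)) :=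
  ((PySem.Dict.ofList tree_lists).items.foldl
    (fun lineage p => lineage.insert p.1 (pvResolve (pvFill (PySem.Dict.ofList nodesDB) p.2) pvRanks))
    PySem.Dict.empty).items

-- ===== PRECONDITION & SPEC =====
-- Pre_ excludes exactly the KeyError inputs: a taxId of some tree_list missing from nodesDB, a referenced
-- node without a 'rank' key, or one whose rank is in RANKS but which lacks 'name'; A raises KeyError there (so does B).
def Pre_getLineages (tree_lists : List (String × List String)) (nodesDB : List (String × List (String × String))) : Prop :=
  ((PySem.Dict.ofList tree_lists).items.all (fun p => p.2.all (fun taxId =>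
    match (PySem.Dict.ofList nodesDB).get? taxId with
    | none => false
    | some node =>
      (PySem.Dict.ofList node).contains "rank" &&
      (!(pvRanks.contains ((PySem.Dict.ofList node).getD "rank" "")) ||
        (PySem.Dict.ofList node).contains "name")))) = true
instance (tree_lists : List (String × List String)) (nodesDB : List (String × List (String × String))) : Decidable (Pre_getLineages tree_lists nodesDB) := by unfold Pre_getLineages; infer_instance

def pvWitness_getLineages : (List (String × List String)) × (List (String × List (String × String))) :=
  ([("t1", ["1", "2"]), ("t2", [])],
   [("1", [("rank", "species"), ("name", "Mus musculus")]), ("2", [("rank", "no rank")])])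

def Spec_getLineages (tree_lists : List (String × List String)) (nodesDB : List (String × List (String × String))) (out : List (String × List (String × String))) : Prop := out = getLineages_alt tree_lists nodesDB
instance (tree_lists : List (String × List String)) (nodesDB : List (String × List (String × String))) (out : List (String × List (String × String))) : Decidable (Spec_getLineages tree_lists nodesDB out) := by unfold Spec_getLineages; infer_instance

-- ===== CLAIM (what is proved, stated in full; the proofs are below) =====
def Claim_equal_getLineages : Prop := ∀ (tree_lists : List (String × List String)) (nodesDB : List (String × List (String × String))), Dom_getLineages tree_lists nodesDB → Pre_getLineages tree_lists nodesDB → Spec_getLineages tree_lists nodesDB (getLineages tree_lists nodesDB)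

-- ===== LEMMAS AND PROOFS =====

-- the per-tree dict always has exactly the six RANKS keys, in order; pvMk6 names that shape
def pvMk6 (v0 v1 v2 v3 v4 v5 : String) : PySem.Dict String String :=
  PySem.Dict.mk [("species", v0), ("genus", v1), ("family", v2), ("order", v3), ("phylum", v4), ("superkingdom", v5)]

-- A's loop, rewritten by List.foldl_reverse as a foldr so that induction follows pvResolve's recursion
def pvCarryR (d : PySem.Dict String String) (rs : List String) : String × PySem.Dict String String :=
  rs.foldr (fun r st => pvCarryStep st r) ("", d)

theorem pvCarry_eq_carryR (d : PySem.Dict String String) :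
    pvRanks.reverse.foldl pvCarryStep ("", d) = pvCarryR d pvRanks := by
  rw [List.foldl_reverse]; rfl

theorem pvMk6_insert (v0 v1 v2 v3 v4 v5 w : String) :
    (pvMk6 v0 v1 v2 v3 v4 v5).insert "species" w = pvMk6 w v1 v2 v3 v4 v5 ∧
    (pvMk6 v0 v1 v2 v3 v4 v5).insert "genus" w = pvMk6 v0 w v2 v3 v4 v5 ∧
    (pvMk6 v0 v1 v2 v3 v4 v5).insert "family" w = pvMk6 v0 v1 w v3 v4 v5 ∧
    (pvMk6 v0 v1 v2 v3 v4 v5).insert "order" w = pvMk6 v0 v1 v2 w v4 v5 ∧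
    (pvMk6 v0 v1 v2 v3 v4 v5).insert "phylum" w = pvMk6 v0 v1 v2 v3 w v5 ∧
    (pvMk6 v0 v1 v2 v3 v4 v5).insert "superkingdom" w = pvMk6 v0 v1 v2 v3 v4 w := by
  refine ⟨?_, ?_, ?_, ?_, ?_, ?_⟩ <;>
    (apply PySem.Dict.ext;
     rw [PySem.Dict.items_insert_of_contains] <;> simp [pvMk6])

theorem pvMk6_shape_insert (v0 v1 v2 v3 v4 v5 w : String) (r : String) (hr : r ∈ pvRanks) :
    ∃ u0 u1 u2 u3 u4 u5, (pvMk6 v0 v1 v2 v3 v4 v5).insert r w = pvMk6 u0 u1 u2 u3 u4 u5 := by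
  obtain ⟨h0, h1, h2, h3, h4, h5⟩ := pvMk6_insert v0 v1 v2 v3 v4 v5 w
  simp only [pvRanks, List.mem_cons, List.not_mem_nil, or_false] at hr
  rcases hr with h | h | h | h | h | h <;> subst h
  · exact ⟨_, _, _, _, _, _, h0⟩
  · exact ⟨_, _, _, _, _, _, h1⟩
  · exact ⟨_, _, _, _, _, _, h2⟩
  · exact ⟨_, _, _, _, _, _, h3⟩
  · exact ⟨_, _, _, _, _, _, h4⟩
  · exact ⟨_, _, _, _, _, _, h5⟩

theorem pvInit_eq : pvInit = pvMk6 "undef" "undef" "undef" "undef" "undef" "undef" := by decide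

theorem pvFill_aux (nodesDB : PySem.Dict String (List (String × String))) :
    ∀ (tl : List String) (v0 v1 v2 v3 v4 v5 : String),
    ∃ w0 w1 w2 w3 w4 w5,
      tl.foldl (pvFillStep nodesDB) (pvMk6 v0 v1 v2 v3 v4 v5) = pvMk6 w0 w1 w2 w3 w4 w5 := by
  intro tl
  induction tl with
  | nil => intro v0 v1 v2 v3 v4 v5; exact ⟨v0, v1, v2, v3, v4, v5, rfl⟩
  | cons t rest ih =>
    intro v0 v1 v2 v3 v4 v5
    rw [List.foldl_cons]
    by_cases hc : pvRanks.contains ((PySem.Dict.ofList (nodesDB.getD t [])).getD "rank" "") = true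
    · have hm : ((PySem.Dict.ofList (nodesDB.getD t [])).getD "rank" "") ∈ pvRanks := by
        simpa using hc
      obtain ⟨u0, u1, u2, u3, u4, u5, hu⟩ :=
        pvMk6_shape_insert v0 v1 v2 v3 v4 v5
          ((PySem.Dict.ofList (nodesDB.getD t [])).getD "name" "") _ hm
      have hstep : pvFillStep nodesDB (pvMk6 v0 v1 v2 v3 v4 v5) t = pvMk6 u0 u1 u2 u3 u4 u5 := by
        unfold pvFillStep
        rw [if_pos hc]
        exact hu
      rw [hstep]; exact ih u0 u1 u2 u3 u4 u5
    · have hstep : pvFillStep nodesDB (pvMk6 v0 v1 v2 v3 v4 v5) t = pvMk6 v0 v1 v2 v3 v4 v5 := by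
        unfold pvFillStep
        rw [if_neg hc]
      rw [hstep]; exact ih v0 v1 v2 v3 v4 v5

theorem pvFill_shape (nodesDB : PySem.Dict String (List (String × String))) (tl : List String) :
    ∃ v0 v1 v2 v3 v4 v5, pvFill nodesDB tl = pvMk6 v0 v1 v2 v3 v4 v5 := by
  unfold pvFill
  rw [pvInit_eq]
  exact pvFill_aux nodesDB tl _ _ _ _ _ _

theorem pvCarryStep_snd_ne (st : String × PySem.Dict String String) (r k : String) (h : k ≠ r) :
    ((pvCarryStep st r).2).getD k "" = st.2.getD k "" := by
  unfold pvCarryStep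
  split_ifs <;> simp [PySem.Dict.getD_insert, h]

theorem pvCarryR_snd_not_mem : ∀ (rs : List String) (d : PySem.Dict String String) (k : String),
    k ∉ rs → ((pvCarryR d rs).2).getD k "" = d.getD k "" := by
  intro rs
  induction rs with
  | nil => intro d k _; rfl
  | cons r rest ih =>
    intro d k hk
    have hne : k ≠ r := fun h => hk (h ▸ List.mem_cons_self)
    have hrest : k ∉ rest := fun h => hk (List.mem_cons_of_mem _ h)
    have hC : pvCarryR d (r :: rest) = pvCarryStep (pvCarryR d rest) r := rfl
    rw [hC, pvCarryStep_snd_ne _ _ _ hne, ih d k hrest]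

theorem pvCarryR_fst : ∀ (rs : List String) (d : PySem.Dict String String),
    rs.Nodup → (pvCarryR d rs).1 = pvNearestDef d rs := by
  intro rs
  induction rs with
  | nil => intro d _; simp [pvCarryR, pvNearestDef]
  | cons r rest ih =>
    intro d hnd
    have hr : r ∉ rest := (List.nodup_cons.mp hnd).1
    have hrest : rest.Nodup := (List.nodup_cons.mp hnd).2
    have hC : pvCarryR d (r :: rest) = pvCarryStep (pvCarryR d rest) r := rfl
    have hC2 : ((pvCarryR d rest).2).getD r "" = d.getD r "" := pvCarryR_snd_not_mem rest d r hr
    rw [hC]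
    unfold pvCarryStep
    rw [hC2]
    cases hb : (d.getD r "" == "undef") with
    | false =>
      rw [if_pos rfl]
      exact (by simp [pvNearestDef, bne, hb] : pvNearestDef d (r :: rest) = d.getD r "").symm
    | true =>
      have hnear : pvNearestDef d (r :: rest) = pvNearestDef d rest := by
        simp [pvNearestDef, bne, hb]
      rw [hnear, ← ih d hrest]
      rw [if_neg (by simp)]
      split_ifs <;> rfl

theorem pvCarryR_main : ∀ (rs : List String) (d : PySem.Dict String String),
    rs.Nodup →
    rs.map (fun r => (r, ((pvCarryR d rs).2).getD r "")) = pvResolve d rs := by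
  intro rs
  induction rs with
  | nil => intro d _; rfl
  | cons r rest ih =>
    intro d hnd
    have hr : r ∉ rest := (List.nodup_cons.mp hnd).1
    have hrest : rest.Nodup := (List.nodup_cons.mp hnd).2
    have hC : pvCarryR d (r :: rest) = pvCarryStep (pvCarryR d rest) r := rfl
    have hC2 : ((pvCarryR d rest).2).getD r "" = d.getD r "" := pvCarryR_snd_not_mem rest d r hr
    have hfst : (pvCarryR d rest).1 = pvNearestDef d rest := pvCarryR_fst rest d hrest
    have hres : pvResolve d (r :: rest) =
        (r, if (d.getD r "" != "undef") = true then d.getD r ""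
            else if (pvNearestDef d rest != "") = true then pvNearestDef d rest ++ "-undef"
            else d.getD r "") :: pvResolve d rest := rfl
    rw [List.map_cons, hC, hres]
    have htail : rest.map (fun r' => (r', ((pvCarryStep (pvCarryR d rest) r).2).getD r' "")) =
        rest.map (fun r' => (r', ((pvCarryR d rest).2).getD r' "")) := by
      apply List.map_congr_left
      intro r' hr'
      rw [pvCarryStep_snd_ne _ _ _ (fun h => hr (by rw [← h]; exact hr'))]
    rw [htail, ih d hrest]
    have hhead : ((pvCarryStep (pvCarryR d rest) r).2).getD r "" =
        (if (d.getD r "" != "undef") = true then d.getD r ""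
         else if (pvNearestDef d rest != "") = true then pvNearestDef d rest ++ "-undef"
         else d.getD r "") := by
      unfold pvCarryStep
      rw [hC2, hfst]
      cases hb : (d.getD r "" == "undef") with
      | false =>
        rw [if_pos rfl, if_pos (by simp [bne, hb])]
        exact hC2
      | true =>
        have hval : d.getD r "" = "undef" := by simpa using hb
        rw [if_neg (show ¬(true = false) by simp)]
        rw [if_neg (show ¬((d.getD r "" != "undef") = true) by simp [bne, hb])]
        cases hc : (pvNearestDef d rest == "") with
        | false =>
          rw [if_pos rfl]
          rw [if_pos (show (pvNearestDef d rest != "") = true by simp [bne, hc])]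
          show ((pvCarryR d rest).2.insert r
              (pvNearestDef d rest ++ "-" ++ d.getD r "")).getD r "" = _
          rw [PySem.Dict.getD_insert_self, hval, String.append_assoc]
          rfl
        | true =>
          rw [if_neg (show ¬(true = false) by simp)]
          rw [if_neg (show ¬((pvNearestDef d rest != "") = true) by simp [bne, hc])]
          exact hC2
    rw [hhead]

theorem pvCarryR_shape : ∀ (rs : List String), (∀ r ∈ rs, r ∈ pvRanks) →
    ∀ (v0 v1 v2 v3 v4 v5 : String),
    ∃ w0 w1 w2 w3 w4 w5, (pvCarryR (pvMk6 v0 v1 v2 v3 v4 v5) rs).2 = pvMk6 w0 w1 w2 w3 w4 w5 := by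
  intro rs
  induction rs with
  | nil => intro _ v0 v1 v2 v3 v4 v5; exact ⟨v0, v1, v2, v3, v4, v5, rfl⟩
  | cons r rest ih =>
    intro hmem v0 v1 v2 v3 v4 v5
    obtain ⟨w0, w1, w2, w3, w4, w5, hw⟩ :=
      ih (fun x hx => hmem x (List.mem_cons_of_mem _ hx)) v0 v1 v2 v3 v4 v5
    have hC : pvCarryR (pvMk6 v0 v1 v2 v3 v4 v5) (r :: rest) =
        pvCarryStep (pvCarryR (pvMk6 v0 v1 v2 v3 v4 v5) rest) r := rfl
    rw [hC]
    unfold pvCarryStep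
    split_ifs
    · exact ⟨w0, w1, w2, w3, w4, w5, hw⟩
    · rw [hw]
      exact pvMk6_shape_insert w0 w1 w2 w3 w4 w5 _ r (hmem r List.mem_cons_self)
    · exact ⟨w0, w1, w2, w3, w4, w5, hw⟩

theorem pvMk6_items_map (w0 w1 w2 w3 w4 w5 : String) :
    (pvMk6 w0 w1 w2 w3 w4 w5).items = pvRanks.map (fun r => (r, (pvMk6 w0 w1 w2 w3 w4 w5).getD r "")) := by
  simp [pvMk6, pvRanks, pysem]

theorem pvRanks_nodup : pvRanks.Nodup := by decide

theorem pvPerTree (nd : PySem.Dict String (List (String × String))) (tl : List String) :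
    ((pvRanks.reverse.foldl pvCarryStep ("", pvFill nd tl)).2).items =
    pvResolve (pvFill nd tl) pvRanks := by
  rw [pvCarry_eq_carryR]
  obtain ⟨v0, v1, v2, v3, v4, v5, hv⟩ := pvFill_shape nd tl
  have hm := pvCarryR_main pvRanks (pvFill nd tl) pvRanks_nodup
  rw [hv] at hm ⊢
  obtain ⟨w0, w1, w2, w3, w4, w5, hw⟩ :=
    pvCarryR_shape pvRanks (fun _ h => h) v0 v1 v2 v3 v4 v5
  rw [hw, pvMk6_items_map, ← hw]
  exact hm

-- ===== VERDICT (by name: the statement is the Claim_ definition above) =====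
theorem getLineages_spec : Claim_equal_getLineages := by
  intro tree_lists nodesDB _ _
  unfold Spec_getLineages getLineages getLineages_alt
  have hf : (fun (lineage : PySem.Dict String (List (String × String))) (p : String × List String) =>
      lineage.insert p.1 ((pvRanks.reverse.foldl pvCarryStep ("", pvFill (PySem.Dict.ofList nodesDB) p.2)).2.items))
      = (fun (lineage : PySem.Dict String (List (String × String))) (p : String × List String) =>
      lineage.insert p.1 (pvResolve (pvFill (PySem.Dict.ofList nodesDB) p.2) pvRanks)) := by
    funext lineage p
    rw [pvPerTree]
  rw [hf]
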